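-- pv_equiv track=rewrite | github.com/collinsakenga/codewars_solutions | 5 kyu/Basic DeNico.py | de_nico
-- ===== SOURCE A (Python) =====
-- def de_nico(key,msg):
--     dict=[]
--     for i in key:
--         dict.append([i])
--     for i,j in enumerate(msg):
--         dict[i%len(dict)].append(j)
--     for i in range(len(dict)):
--         dict[i]=[dict[i][:1]]+[dict[i][1:]]
--     string="".join(sorted(key))
--     res=[]
--     for i in range(len(dict)):
--         res.append(dict[string.index(dict[i][0][0])][1])
--     solution=""
--     maxlen=0
--     for i in res:
--         maxlen=max(len(i), maxlen)
--     for i in range(maxlen):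
--         for j in range(len(res)):
--             try:
--                 solution+=res[j][i]
--             except:
--                 pass
--     return solution.rstrip()
-- ===== SOURCE B (Python) =====
-- def de_nico(key, msg):
--     if not key:
--         return ""
--     k = len(key)
--     s = sorted(key)
--     pos = {}
--     for idx, c in enumerate(s):
--         if c not in pos:
--             pos[c] = idx
--     order = [pos[c] for c in key]
--     out = []
--     for i in range(0, len(msg), k):
--         chunk = msg[i:i + k]
--         for j in order:
--             if j < len(chunk):
--                 out.append(chunk[j])
--     return "".join(out).rstrip()
-- ===== Notes on version B (the rewrite author's own statement) =====
-- stated objective: faster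
-- what changed: B replaces A's column-bucket round-robin build, repeated sorted(key).index scans and column-wise transposed read-out by one first-occurrence position dict over sorted(key) and a direct per-block pass over msg using that index permutation.
import Mathlib
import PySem

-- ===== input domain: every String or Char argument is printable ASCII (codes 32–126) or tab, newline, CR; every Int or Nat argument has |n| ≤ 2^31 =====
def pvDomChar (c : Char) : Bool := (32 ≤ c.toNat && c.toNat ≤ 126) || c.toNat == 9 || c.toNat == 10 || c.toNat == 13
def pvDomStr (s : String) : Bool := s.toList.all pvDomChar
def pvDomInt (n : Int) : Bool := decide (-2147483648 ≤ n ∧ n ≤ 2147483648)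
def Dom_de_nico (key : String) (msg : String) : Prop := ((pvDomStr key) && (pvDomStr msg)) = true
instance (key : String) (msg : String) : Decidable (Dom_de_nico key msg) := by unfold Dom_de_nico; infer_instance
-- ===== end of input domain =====

-- B replaces A's column-bucket build, per-column sorted(key).index scans and transposed read-out
-- by a first-occurrence position dict over sorted(key) and a direct per-block pass over msg; objective: faster.

-- ===== PORT A =====
-- 'for i,j in enumerate(msg): dict[i%len(dict)].append(j)' — the enumerate counter is n.
-- (n % d.length with d.length = 0 is unreachable inside Pre_: Python raises ZeroDivisionError there.)
def deNicoDist (n : Nat) (d : List (List Char)) : List Char → List (List Char)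
  | [] => d
  | c :: t => deNicoDist (n + 1) (d.modify (n % d.length) (· ++ [c])) t

def de_nico (key : String) (msg : String) : String :=
  let d0 : List (List Char) := key.toList.map (fun i => [i])
  let d1 := deNicoDist 0 d0 msg.toList
  -- dict[i] = [dict[i][:1]] + [dict[i][1:]]
  let d2 : List (List Char × List Char) := d1.map (fun l => (l.take 1, l.drop 1))
  -- string = "".join(sorted(key)), kept as its character list
  let str : List Char := PySem.List.sorted key.toList (fun c => c) false
  -- res.append(dict[string.index(dict[i][0][0])][1]); dict[i][0][0] always exists (bucket head is a
  -- key char), string.index always finds it and is < len(dict), so headD/getD defaults are never used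
  let res : List (List Char) :=
    d2.map (fun e => (d2.getD ((PySem.List.index? str (e.1.headD ' ')).getD 0) ([], [])).2)
  let maxlen := res.foldl (fun acc l => max l.length acc) 0
  -- try: solution += res[j][i]  except: pass
  let solution := (List.range maxlen).foldl (fun s i =>
    res.foldl (fun s l => match l[i]? with | some c => s ++ [c] | none => s) s) []
  PySem.Str.rstrip (String.ofList solution)

-- ===== PORT B =====
-- 'pos = {}; for idx, c in enumerate(s):  if c not in pos: pos[c] = idx' then
-- 'for i in range(0, len(msg), k): chunk = msg[i:i+k]; for j in order: if j < len(chunk): out.append(chunk[j])'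
-- range → pyRange, msg[i:i+k] → slice, chunk[j] → pyGet? (always some: 0 ≤ j < len(chunk)).
-- pos[c] always succeeds (c ∈ sorted key), so the getD default is never used.
def de_nico_alt (key : String) (msg : String) : String :=
  if key.toList = [] then ""
  else
    let k := key.toList.length
    let s := PySem.List.sorted key.toList (fun c => c) false
    let pos := (PySem.List.enumerate s).foldl
      (fun d p => if PySem.Dict.contains d p.2 then d else PySem.Dict.insert d p.2 p.1)
      PySem.Dict.empty
    let order : List Int := key.toList.map (fun c => (PySem.Dict.get? pos c).getD 0)
    let out := (PySem.List.pyRange 0 (msg.toList.length : Int) (k : Int)).foldl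
      (fun acc i =>
        let chunk := PySem.List.slice msg.toList (some i) (some (i + (k : Int)))
        order.foldl (fun acc j =>
          if j < (chunk.length : Int) then acc ++ (PySem.List.pyGet? chunk j).toList else acc) acc) []
    PySem.Str.rstrip (String.ofList out)

-- ===== PRECONDITION & SPEC =====
-- Pre_ excludes exactly key = "" with msg ≠ "", where A raises ZeroDivisionError (i % len(dict)).
def Pre_de_nico (key : String) (msg : String) : Prop := key ≠ "" ∨ msg = ""
instance (key : String) (msg : String) : Decidable (Pre_de_nico key msg) := by
  unfold Pre_de_nico; infer_instance

def pvWitness_de_nico : String × String := ("bac", "secretmsg")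

def Spec_de_nico (key : String) (msg : String) (out : String) : Prop := out = de_nico_alt key msg
instance (key : String) (msg : String) (out : String) : Decidable (Spec_de_nico key msg out) := by
  unfold Spec_de_nico; infer_instance

-- ===== CLAIM (what is proved, stated in full; the proofs are below) =====
def Claim_equal_de_nico : Prop := ∀ (key : String) (msg : String), Dom_de_nico key msg → Pre_de_nico key msg → Spec_de_nico key msg (de_nico key msg)


-- ===== LEMMAS AND PROOFS =====

-- ---- proof-side helpers: msg cut into blocks of k, and round-robin columns ----

def pvChunks (k : Nat) (hk : 0 < k) (m : List Char) : List (List Char) :=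
  if m = [] then [] else m.take k :: pvChunks k hk (m.drop k)
termination_by m.length
decreasing_by
  simp only [List.length_drop]
  have : m.length ≠ 0 := fun h => (by assumption : ¬ m = []) (List.eq_nil_of_length_eq_zero h)
  omega

def pvAddChunk : List (List Char) → List Char → List (List Char)
  | [], _ => []
  | b :: bs, [] => b :: bs
  | b :: bs, c :: cs => (b ++ [c]) :: pvAddChunk bs cs

def pvCol (p : Nat) (chs : List (List Char)) : List Char := chs.filterMap (fun ch => ch[p]?)

lemma pv_len_dist : ∀ (m : List Char) (n : Nat) (d : List (List Char)),
    (deNicoDist n d m).length = d.length := by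
  intro m
  induction m with
  | nil => intro n d; rfl
  | cons c t ih => intro n d; simp [deNicoDist, List.length_modify, ih]

lemma pv_dist_congr : ∀ (m : List Char) (n₁ n₂ : Nat) (d : List (List Char)),
    n₁ % d.length = n₂ % d.length → deNicoDist n₁ d m = deNicoDist n₂ d m := by
  intro m
  induction m with
  | nil => intro n₁ n₂ d h; rfl
  | cons c t ih =>
    intro n₁ n₂ d h
    simp only [deNicoDist, h]
    apply ih
    simp only [List.length_modify]
    rw [Nat.add_mod n₁ 1, h, ← Nat.add_mod]

lemma pv_modify_append (d₁ : List (List Char)) (b : List Char) (bs : List (List Char))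
    (f : List Char → List Char) : (d₁ ++ b :: bs).modify d₁.length f = d₁ ++ f b :: bs := by
  induction d₁ with
  | nil => simp [List.modify]
  | cons a l ih => simpa [List.modify] using ih

lemma pv_len_addChunk : ∀ (d : List (List Char)) (ch : List Char),
    (pvAddChunk d ch).length = d.length := by
  intro d
  induction d with
  | nil => intro ch; rfl
  | cons b bs ih => intro ch; cases ch <;> simp [pvAddChunk, ih]

lemma pv_dist_step_full : ∀ (ch : List Char) (d₂ d₁ : List (List Char)) (t : List Char),
    ch.length = d₂.length →
    deNicoDist d₁.length (d₁ ++ d₂) (ch ++ t)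
      = deNicoDist (d₁.length + ch.length) (d₁ ++ pvAddChunk d₂ ch) t := by
  intro ch
  induction ch with
  | nil =>
    intro d₂ d₁ t h
    have : d₂ = [] := List.eq_nil_of_length_eq_zero h.symm
    subst this; simp [pvAddChunk]
  | cons c cs ih =>
    intro d₂ d₁ t h
    cases d₂ with
    | nil => simp at h
    | cons b bs =>
      simp only [List.cons_append, deNicoDist]
      have hlt : d₁.length < (d₁ ++ b :: bs).length := by simp
      rw [Nat.mod_eq_of_lt hlt, pv_modify_append]
      have h' : cs.length = bs.length := by simpa using h
      have := ih bs (d₁ ++ [b ++ [c]]) t h'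
      simp only [List.length_append, List.length_cons, List.length_nil, List.append_assoc,
        List.singleton_append] at this
      rw [this]
      simp only [pvAddChunk, List.length_cons]
      congr 1
      omega

lemma pv_dist_short : ∀ (ch : List Char) (d₂ d₁ : List (List Char)),
    ch.length ≤ d₂.length →
    deNicoDist d₁.length (d₁ ++ d₂) ch = d₁ ++ pvAddChunk d₂ ch := by
  intro ch
  induction ch with
  | nil =>
    intro d₂ d₁ h
    cases d₂ with
    | nil => simp [pvAddChunk, deNicoDist]
    | cons b bs => simp [pvAddChunk, deNicoDist]
  | cons c cs ih =>
    intro d₂ d₁ h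
    cases d₂ with
    | nil => simp at h
    | cons b bs =>
      simp only [deNicoDist]
      have hlt : d₁.length < (d₁ ++ b :: bs).length := by simp
      rw [Nat.mod_eq_of_lt hlt, pv_modify_append]
      have h' : cs.length ≤ bs.length := by simpa using h
      have := ih bs (d₁ ++ [b ++ [c]]) h'
      simp only [List.length_append, List.length_cons, List.length_nil, List.append_assoc,
        List.singleton_append] at this
      simpa [pvAddChunk] using this

lemma pv_dist_chunks (k : Nat) (hk : 0 < k) : ∀ (m : List Char) (d : List (List Char)),
    d.length = k → deNicoDist 0 d m = (pvChunks k hk m).foldl pvAddChunk d := by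
  intro m
  induction m using pvChunks.induct k hk with
  | case1 =>
    intro d hd; rw [pvChunks]; simp [deNicoDist]
  | case2 m hm ih =>
    intro d hd
    rw [pvChunks]; simp only [if_neg hm, List.foldl_cons]
    by_cases hlen : k ≤ m.length
    · have htk : (m.take k).length = d.length := by simp [hd]; omega
      have h0 := pv_dist_step_full (m.take k) d [] (m.drop k) (by simpa using htk)
      simp only [List.nil_append, List.length_nil, Nat.zero_add] at h0
      conv_lhs => rw [← List.take_append_drop k m]
      rw [h0]
      have hlen' : (pvAddChunk d (m.take k)).length = k := by rw [pv_len_addChunk, hd]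
      rw [pv_dist_congr _ _ 0 _ (by simp [hlen', htk, hd])]
      exact ih _ hlen'
    · rw [Nat.not_le] at hlen
      have hdrop : m.drop k = [] := List.drop_eq_nil_of_le (by omega)
      have htake : m.take k = m := List.take_of_length_le (by omega)
      have h0 := pv_dist_short m d [] (by omega ▸ (by rw [hd]; omega : m.length ≤ d.length))
      simp only [List.nil_append, List.length_nil] at h0
      rw [htake, hdrop, pvChunks]
      simpa using h0

lemma pv_addChunk_get : ∀ (d : List (List Char)) (ch : List Char) (p : Nat),
    (pvAddChunk d ch)[p]? = (d[p]?).map (fun b => b ++ (ch[p]?).toList) := by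
  intro d
  induction d with
  | nil => intro ch p; cases ch <;> simp [pvAddChunk]
  | cons b bs ih =>
    intro ch p
    cases ch with
    | nil => cases p <;> simp [pvAddChunk]
    | cons c cs => cases p <;> simp [pvAddChunk, ih]

lemma pv_foldl_get : ∀ (chs : List (List Char)) (d : List (List Char)) (p : Nat),
    ((chs.foldl pvAddChunk d))[p]? = (d[p]?).map (· ++ pvCol p chs) := by
  intro chs
  induction chs with
  | nil => intro d p; simp [pvCol]
  | cons ch chs ih =>
    intro d p
    simp only [List.foldl_cons]
    rw [ih, pv_addChunk_get]
    cases hd : d[p]? with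
    | none => simp
    | some b =>
      cases hc : ch[p]? with
      | none => simp [pvCol, List.filterMap_cons, hc]
      | some c => simp [pvCol, List.filterMap_cons, hc]

lemma pv_chunks_ne_nil (k : Nat) (hk : 0 < k) : ∀ (m : List Char),
    ∀ ch ∈ pvChunks k hk m, ch ≠ [] := by
  intro m
  induction m using pvChunks.induct k hk with
  | case1 => intro ch h; rw [pvChunks] at h; simp at h
  | case2 m hm ih =>
    intro ch h
    rw [pvChunks] at h
    simp only [if_neg hm, List.mem_cons] at h
    rcases h with h | h
    · subst h
      intro habs
      rcases List.take_eq_nil_iff.mp habs with h | h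
      · omega
      · exact hm h
    · exact ih ch h

lemma pv_col_len_le (p : Nat) (chs : List (List Char)) :
    (pvCol p chs).length ≤ chs.length := by
  exact List.length_filterMap_le _ _

lemma pv_col_zero_len : ∀ (chs : List (List Char)), (∀ ch ∈ chs, ch ≠ []) →
    (pvCol 0 chs).length = chs.length := by
  intro chs
  induction chs with
  | nil => intro _; rfl
  | cons ch rest ih =>
    intro h
    have hch : ch ≠ [] := h ch (List.mem_cons_self ..)
    cases ch with
    | nil => exact absurd rfl hch
    | cons c cs =>
      simp only [pvCol, List.filterMap_cons] at *
      simp [ih (fun x hx => h x (List.mem_cons_of_mem _ hx))]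

lemma pv_col_get (k : Nat) (hk : 0 < k) : ∀ (m : List Char) (p r : Nat), p < k →
    (pvCol p (pvChunks k hk m))[r]? = (pvChunks k hk m)[r]?.bind (fun ch => ch[p]?) := by
  intro m
  induction m using pvChunks.induct k hk with
  | case1 => intro p r hp; rw [pvChunks]; simp [pvCol]
  | case2 m hm ih =>
    intro p r hp
    rw [pvChunks]
    simp only [if_neg hm]
    by_cases hp2 : p < (m.take k).length
    · obtain ⟨c, hc⟩ : ∃ c, (m.take k)[p]? = some c :=
        ⟨(m.take k)[p], List.getElem?_eq_getElem hp2⟩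
      cases r with
      | zero => simp [pvCol, List.filterMap_cons, hc]
      | succ r => simp [pvCol, List.filterMap_cons, hc, ← ih p r hp, pvCol]
    · rw [Nat.not_lt] at hp2
      have hml : m.length < k := by
        have := List.length_take_le k m
        simp only [List.length_take] at hp2
        omega
      have hdrop : m.drop k = [] := List.drop_eq_nil_of_le (by omega)
      have hc : (m.take k)[p]? = none := List.getElem?_eq_none hp2
      rw [hdrop, pvChunks]
      cases r <;> simp [pvCol, List.filterMap_cons, hc]

lemma pv_foldl_max (N : Nat) : ∀ (l : List (List Char)) (a : Nat), a ≤ N →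
    (∀ x ∈ l, x.length ≤ N) → ((∃ x ∈ l, x.length = N) ∨ a = N) →
    l.foldl (fun acc x => max x.length acc) a = N := by
  intro l
  induction l with
  | nil =>
    intro a ha _ h3
    rcases h3 with ⟨x, hx, _⟩ | h
    · simp at hx
    · simpa using h
  | cons x l ih =>
    intro a ha hle h3
    simp only [List.foldl_cons]
    have hxN : x.length ≤ N := hle x (List.mem_cons_self ..)
    apply ih
    · omega
    · exact fun y hy => hle y (List.mem_cons_of_mem _ hy)
    · rcases h3 with ⟨y, hy, hyN⟩ | h
      · rcases List.mem_cons.mp hy with h | h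
        · right; subst h; omega
        · left; exact ⟨y, h, hyN⟩
      · right; omega

lemma pv_foldl_opt_append (i : Nat) : ∀ (res : List (List Char)) (s : List Char),
    res.foldl (fun s l => match l[i]? with | some c => s ++ [c] | none => s) s
      = s ++ res.flatMap (fun l => (l[i]?).toList) := by
  intro res
  induction res with
  | nil => intro s; simp
  | cons l t ih =>
    intro s
    simp only [List.foldl_cons, List.flatMap_cons]
    cases hl : l[i]? with
    | none => simp [hl, ih]
    | some c => simp [hl, ih]

lemma pv_pos_get : ∀ (l : List Char) (n : Int) (d : PySem.Dict Char Int) (c : Char),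
    PySem.Dict.get? ((PySem.List.enumerate l n).foldl
        (fun d p => if PySem.Dict.contains d p.2 then d else PySem.Dict.insert d p.2 p.1) d) c
      = Option.or (PySem.Dict.get? d c)
          ((PySem.List.index? l c).map (fun v => n + (v : Int))) := by
  intro l
  induction l with
  | nil => intro n d c; cases h : PySem.Dict.get? d c <;> simp [PySem.List.enumerate_nil, h]
  | cons x t ih =>
    intro n d c
    rw [PySem.List.enumerate_cons, List.foldl_cons, ih]
    by_cases hcont : PySem.Dict.contains d x
    · rw [if_pos hcont]
      have hsome : (PySem.Dict.get? d x).isSome = true := by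
        rw [← PySem.Dict.contains_eq_isSome_get?]; exact hcont
      obtain ⟨w, hw⟩ := Option.isSome_iff_exists.mp hsome
      by_cases hxc : x = c
      · subst hxc
        rw [PySem.List.index?_cons_self, hw]
        simp
      · rw [PySem.List.index?_cons_of_ne _ hxc]
        cases h : PySem.Dict.get? d c <;>
          cases hidx : PySem.List.index? t c <;>
            simp [h, hidx, Option.map_map, Function.comp]
        · push_cast
          ring_nf
    · rw [if_neg hcont]
      have hnone : PySem.Dict.get? d x = none := by
        have h1 : (PySem.Dict.get? d x).isSome = false := by
          rw [← PySem.Dict.contains_eq_isSome_get?]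
          exact Bool.not_eq_true _ ▸ eq_false_of_ne_true hcont
        exact Option.not_isSome_iff_eq_none.mp (by simp [h1])
      by_cases hxc : x = c
      · subst hxc
        rw [PySem.Dict.get?_insert_self, PySem.List.index?_cons_self, hnone]
        simp
      · rw [PySem.Dict.get?_insert_of_ne _ _ (fun h => hxc h.symm),
          PySem.List.index?_cons_of_ne _ hxc]
        cases h : PySem.Dict.get? d c <;>
          cases hidx : PySem.List.index? t c <;>
            simp [h, hidx, Option.map_map, Function.comp]
        · push_cast
          ring_nf

lemma pv_foldl_append (g : Nat → List Char) : ∀ (l : List Nat) (s : List Char),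
    l.foldl (fun s i => s ++ g i) s = s ++ l.flatMap g := by
  intro l
  induction l with
  | nil => intro s; simp
  | cons i t ih => intro s; simp [ih]

lemma pv_foldl_congr_mem {α β : Type} (f g : β → α → β) (l : List α) (init : β)
    (h : ∀ (acc : β) (x : α), x ∈ l → f acc x = g acc x) :
    l.foldl f init = l.foldl g init := by
  induction l generalizing init with
  | nil => rfl
  | cons x t ih =>
    simp only [List.foldl_cons]
    rw [h init x (List.mem_cons_self ..)]
    exact ih _ (fun acc y hy => h acc y (List.mem_cons_of_mem _ hy))

lemma pv_pyRange_cons (a b s : Int) (hs : 0 < s) (hab : a < b) :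
    PySem.List.pyRange a b s = a :: PySem.List.pyRange (a + s) b s := by
  rw [PySem.List.pyRange_of_pos _ _ hs, PySem.List.pyRange_of_pos _ _ hs, if_pos hab]
  have hq0 : 0 ≤ (b - a - 1) / s := Int.ediv_nonneg (by omega) (by omega)
  have h1 : (b - a + s - 1) / s = (b - a - 1) / s + 1 := by
    have h := Int.add_mul_ediv_right (b - a - 1) 1 (by omega : s ≠ 0)
    have e : b - a + s - 1 = b - a - 1 + 1 * s := by ring
    rw [e, h]
  have h2 : (b - a + s - 1) / s = (b - a - 1) / s + 1 := h1
  have hcnt : ((b - a + s - 1) / s).toNat = ((b - a - 1) / s).toNat + 1 := by omega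
  have hcnt' : (if a + s < b then ((b - (a + s) + s - 1) / s).toNat else 0)
      = ((b - a - 1) / s).toNat := by
    by_cases hb : a + s < b
    · rw [if_pos hb]
      congr 2
      ring
    · rw [if_neg hb]
      have : (b - a - 1) / s = 0 := Int.ediv_eq_zero_of_lt (by omega) (by omega)
      omega
  rw [hcnt, hcnt', List.range_succ_eq_map, List.map_cons, List.map_map]
  congr 1
  · simp
  · apply List.map_congr_left
    intro x _
    simp only [Function.comp_apply]
    push_cast
    ring

lemma pv_pyRange_shift (a b s : Int) (hs : 0 < s) :
    PySem.List.pyRange (a + s) b s = (PySem.List.pyRange a (b - s) s).map (· + s) := by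
  rw [PySem.List.pyRange_of_pos _ _ hs, PySem.List.pyRange_of_pos _ _ hs, List.map_map]
  have hif : (a + s < b) = (a < b - s) := by
    apply propext
    omega
  rw [show b - (a + s) + s - 1 = b - s - a + s - 1 by ring]
  rw [if_congr (iff_of_eq hif) rfl rfl]
  apply List.map_congr_left
  intro x _
  simp only [Function.comp_apply]
  ring

lemma pv_blocks_eq (k : Nat) (hk : 0 < k) (order : List Nat) : ∀ (m : List Char) (acc : List Char),
    (PySem.List.pyRange 0 (m.length : Int) (k : Int)).foldl
      (fun acc i =>
        order.foldl (fun acc j =>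
          acc ++ ((PySem.List.slice m (some i) (some (i + (k : Int))))[j]?).toList) acc) acc
      = acc ++ (pvChunks k hk m).flatMap (fun ch => order.flatMap (fun j => (ch[j]?).toList)) := by
  intro m
  induction m using pvChunks.induct k hk with
  | case1 =>
    intro acc
    rw [pvChunks]
    rw [PySem.List.pyRange_of_pos _ _ (by exact_mod_cast hk)]
    simp
  | case2 m hm ih =>
    intro acc
    have hmlen : 0 < m.length := List.length_pos_iff.mpr hm
    rw [pv_pyRange_cons 0 _ _ (by exact_mod_cast hk) (by exact_mod_cast hmlen), List.foldl_cons]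
    have hslice0 : PySem.List.slice m (some 0) (some (0 + (k : Int))) = m.take k := by
      rw [Int.zero_add]
      simp only [PySem.List.slice_zero_start]
      exact PySem.List.slice_to_natCast m k
    rw [hslice0, pv_foldl_append]
    have hshift := pv_pyRange_shift 0 (m.length : Int) (k : Int) (by exact_mod_cast hk)
    rw [hshift, List.foldl_map]
    have hbody : ∀ (acc' : List Char) (i : Int), i ∈ PySem.List.pyRange 0 ((m.length : Int) - k) k →
        order.foldl (fun acc j =>
          acc ++ ((PySem.List.slice m (some (i + k)) (some (i + k + (k : Int))))[j]?).toList) acc'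
        = order.foldl (fun acc j =>
          acc ++ ((PySem.List.slice (m.drop k) (some i) (some (i + (k : Int))))[j]?).toList) acc' := by
      intro acc' i hi
      have hi0 : 0 ≤ i :=
        ((PySem.List.mem_pyRange_iff_of_pos (by exact_mod_cast hk) i).mp hi).1
      obtain ⟨j, rfl⟩ : ∃ j : Nat, i = (j : Int) := ⟨i.toNat, (Int.toNat_of_nonneg hi0).symm⟩
      have hsl : PySem.List.slice m (some ((j : Int) + k)) (some ((j : Int) + k + (k : Int)))
          = PySem.List.slice (m.drop k) (some (j : Int)) (some ((j : Int) + (k : Int))) := by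
        have e1 : ((j : Int) + k) = ((j + k : Nat) : Int) := by push_cast; ring
        rw [e1]
        have e2 : (((j + k : Nat) : Int) + (k : Int)) = ((j + k + k : Nat) : Int) := by
          push_cast; ring
        rw [e2, PySem.List.slice_natCast, PySem.List.slice_natCast, List.drop_drop]
        rw [show j + k + k - (j + k) = k by omega, show j + k - j = k by omega,
          show j + k = k + j by omega]
      rw [hsl]
    refine Eq.trans (pv_foldl_congr_mem _ _ _ _ hbody) ?_
    by_cases hbig : k ≤ m.length
    · have hlen : (((m.drop k).length : Nat) : Int) = (m.length : Int) - k := by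
        simp only [List.length_drop]
        omega
      rw [← hlen, ih]
      conv_rhs => rw [pvChunks]
      rw [if_neg hm, List.flatMap_cons, List.append_assoc]
    · rw [Nat.not_le] at hbig
      have hdrop : m.drop k = [] := List.drop_eq_nil_of_le (by omega)
      have htake : m.take k = m := List.take_of_length_le (by omega)
      have hneg : PySem.List.pyRange 0 ((m.length : Int) - k) (k : Int) = [] := by
        rw [PySem.List.pyRange_of_pos _ _ (by exact_mod_cast hk), if_neg (by omega)]
        simp
      rw [hneg, List.foldl_nil, pvChunks, if_neg hm, hdrop, pvChunks, if_pos rfl, htake]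
      simp

lemma pv_range_flatMap (l : List (List Char)) (G : List Char → List Char) :
    (List.range l.length).flatMap (fun r => G (l.getD r [])) = l.flatMap G := by
  induction l with
  | nil => simp
  | cons x t ih =>
    simp only [List.length_cons, List.range_succ_eq_map, List.flatMap_cons, List.flatMap_map]
    simp only [List.getD_cons_zero, List.getD_cons_succ]
    rw [← ih]


theorem pv_main (key msg : String) (hk : key.toList ≠ []) :
    de_nico key msg = de_nico_alt key msg := by
  have hkpos : 0 < key.toList.length := List.length_pos_iff.mpr hk
  simp only [de_nico, de_nico_alt]
  rw [if_neg hk]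
  refine congrArg (fun l => PySem.Str.rstrip (String.ofList l)) ?_
  set kl := key.toList with hkl
  set m := msg.toList with hm
  set str := PySem.List.sorted kl (fun c => c) false with hstr
  set d1 := deNicoDist 0 (List.map (fun i => [i]) kl) m with hd1
  set d2 := List.map (fun l => (List.take 1 l, List.drop 1 l)) d1 with hd2
  set F : Char → Nat := fun c => (PySem.List.index? str c).getD 0 with hF
  have hd0len : (List.map (fun i => ([i] : List Char)) kl).length = kl.length := by simp
  have hd1chunks : d1 = (pvChunks kl.length hkpos m).foldl pvAddChunk
      (List.map (fun i => [i]) kl) := by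
    rw [hd1]; exact pv_dist_chunks _ hkpos m _ hd0len
  set chs := pvChunks kl.length hkpos m with hchs
  have hd1get : ∀ p : Nat, d1[p]? = (kl[p]?).map (fun c => c :: pvCol p chs) := by
    intro p
    rw [hd1chunks, pv_foldl_get, List.getElem?_map]
    cases h : kl[p]? <;> simp [h]
  have hd2get : ∀ p : Nat, d2[p]? = (kl[p]?).map (fun c => ([c], pvCol p chs)) := by
    intro p
    rw [hd2, List.getElem?_map, hd1get p]
    cases h : kl[p]? <;> simp [h]
  have hd2len : d2.length = kl.length := by
    rw [hd2, hd1]; simp [pv_len_dist]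
  have hFspec : ∀ c ∈ kl, PySem.List.index? str c = some (F c) ∧ F c < kl.length := by
    intro c hc
    have hmem : c ∈ str := by rw [hstr]; exact (PySem.List.mem_sorted kl _ _ c).mpr hc
    obtain ⟨v, hv⟩ := Option.isSome_iff_exists.mp ((PySem.List.index?_isSome_iff str c).mpr hmem)
    obtain ⟨hvlt, -, -⟩ := PySem.List.getElem_of_index?_eq_some hv
    have hlen : str.length = kl.length := by rw [hstr]; exact PySem.List.length_sorted ..
    have hFv : F c = v := by
      show (PySem.List.index? str c).getD 0 = v
      rw [hv]
      rfl
    exact ⟨by rw [hFv]; exact hv, by omega⟩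
  set res := List.map
      (fun e => (d2.getD ((PySem.List.index? str (e.1.headD ' ')).getD 0) ([], [])).2) d2
    with hres
  have hreslen : res.length = kl.length := by rw [hres]; simpa using hd2len
  have hresget : ∀ (p : Nat) (hp : p < kl.length), res[p]? = some (pvCol (F kl[p]) chs) := by
    intro p hp
    have hklp : kl[p]? = some kl[p] := List.getElem?_eq_getElem hp
    rw [hres, List.getElem?_map, hd2get p, hklp]
    simp only [Option.map_some]
    have hcp : kl[p] ∈ kl := List.getElem_mem hp
    obtain ⟨hidx, hlt⟩ := hFspec _ hcp
    have h1 : (([kl[p]] : List Char).headD ' ') = kl[p] := rfl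
    have h2 : (PySem.List.index? str kl[p]).getD 0 = F kl[p] := rfl
    rw [h1, h2]
    have hg : d2[F kl[p]]? = some ([(kl[F kl[p]]'(by omega))], pvCol (F kl[p]) chs) := by
      rw [hd2get, List.getElem?_eq_getElem (by omega : F kl[p] < kl.length)]
      rfl
    rw [List.getD_eq_getElem?_getD, hg]
    rfl
  have hchne : ∀ ch ∈ chs, ch ≠ [] := pv_chunks_ne_nil _ hkpos m
  have hM : res.foldl (fun acc l => max l.length acc) 0 = chs.length := by
    apply pv_foldl_max
    · exact Nat.zero_le _
    · intro x hx
      obtain ⟨p, hp⟩ := List.mem_iff_getElem?.mp hx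
      have hplt : p < res.length := by
        rcases List.getElem?_eq_some_iff.mp hp with ⟨h, -⟩
        exact h
      rw [hresget p (by omega)] at hp
      have : x = pvCol (F (kl[p]'(by omega))) chs := by
        injection hp with h; exact h.symm
      rw [this]
      exact pv_col_len_le _ _
    · left
      have hstrne : str ≠ [] := by
        intro habs
        have : str.length = kl.length := by rw [hstr]; exact PySem.List.length_sorted ..
        rw [habs] at this
        simp at this
        omega
      obtain ⟨c0, t, hstreq⟩ := List.exists_cons_of_ne_nil hstrne
      have hc0kl : c0 ∈ kl := by
        have : c0 ∈ str := by rw [hstreq]; exact List.mem_cons_self ..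
        rw [hstr] at this
        exact (PySem.List.mem_sorted kl _ _ c0).mp this
      obtain ⟨p, hplt, hpe⟩ := List.getElem_of_mem hc0kl
      have hF0 : F (kl[p]'hplt) = 0 := by
        rw [hpe]
        show (PySem.List.index? str c0).getD 0 = 0
        rw [hstreq, PySem.List.index?_cons_self]
        rfl
      refine ⟨pvCol 0 chs, ?_, pv_col_zero_len chs hchne⟩
      have h := hresget p hplt
      rw [hF0] at h
      exact List.mem_of_getElem? h
  rw [hM]
  set pos := (PySem.List.enumerate str).foldl
      (fun d p => if PySem.Dict.contains d p.2 then d else PySem.Dict.insert d p.2 p.1)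
      PySem.Dict.empty with hpos
  have hposget : ∀ c ∈ kl, PySem.Dict.get? pos c = some ((F c : Nat) : Int) := by
    intro c hc
    rw [hpos, pv_pos_get str 0 PySem.Dict.empty c, (hFspec c hc).1]
    simp [PySem.Dict.get?_empty]
  have horder : kl.map (fun c => (PySem.Dict.get? pos c).getD 0)
      = (List.map F kl).map (fun v : Nat => (v : Int)) := by
    rw [List.map_map]
    apply List.map_congr_left
    intro c hc
    simp [hposget c hc]
  have hconv : ∀ (acc : List Char) (i : Int), i ∈ PySem.List.pyRange 0 (m.length : Int) (kl.length : Int) →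
      (kl.map (fun c => (PySem.Dict.get? pos c).getD 0)).foldl (fun acc j =>
          if j < ((PySem.List.slice m (some i) (some (i + (kl.length : Int)))).length : Int) then
            acc ++ (PySem.List.pyGet? (PySem.List.slice m (some i) (some (i + (kl.length : Int)))) j).toList
          else acc) acc
      = (List.map F kl).foldl (fun acc j =>
          acc ++ ((PySem.List.slice m (some i) (some (i + (kl.length : Int))))[j]?).toList) acc := by
    intro acc i _
    rw [horder, List.foldl_map]
    apply pv_foldl_congr_mem
    intro acc' j _
    by_cases hj : j < (PySem.List.slice m (some i) (some (i + (kl.length : Int)))).length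
    · rw [if_pos (by exact_mod_cast hj), PySem.List.pyGet?_natCast]
    · rw [if_neg (by exact_mod_cast hj),
        List.getElem?_eq_none (by omega : (PySem.List.slice m (some i) (some (i + (kl.length : Int)))).length ≤ j)]
      simp
  have hRHS := pv_blocks_eq kl.length hkpos (List.map F kl) m []
  have hchB : pvChunks kl.length hkpos m = chs := rfl
  rw [hchB] at hRHS
  conv_rhs => rw [pv_foldl_congr_mem _ _ _ _ hconv, hRHS]
  have step1 : (List.range chs.length).foldl
        (fun s i => res.foldl (fun s l => match l[i]? with | some c => s ++ [c] | none => s) s) []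
      = (List.range chs.length).foldl (fun s i => s ++ res.flatMap (fun l => (l[i]?).toList)) [] := by
    congr 1
    funext s i
    exact pv_foldl_opt_append i res s
  rw [step1, pv_foldl_append, List.nil_append]
  have step2 : ∀ r ∈ List.range chs.length,
      res.flatMap (fun l => (l[r]?).toList)
        = (fun ch => (List.map F kl).flatMap (fun j => (ch[j]?).toList)) (chs.getD r []) := by
    intro r hr
    have hrlt : r < chs.length := List.mem_range.mp hr
    have hchr : chs[r]? = some (chs.getD r []) := by
      rw [List.getD_eq_getElem?_getD, List.getElem?_eq_getElem hrlt]
      rfl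
    simp only [List.flatMap_def]
    congr 1
    apply List.ext_getElem?
    intro p
    conv_lhs => rw [List.getElem?_map]
    conv_rhs => rw [List.map_map, List.getElem?_map]
    by_cases hp : p < kl.length
    · have hklp : kl[p]? = some kl[p] := List.getElem?_eq_getElem hp
      have hFlt : F kl[p] < kl.length := (hFspec _ (List.getElem_mem hp)).2
      rw [hresget p hp, hklp]
      simp only [Option.map_some, Function.comp_apply]
      rw [hchs] at hchr
      rw [hchs, pv_col_get kl.length hkpos m _ r hFlt, hchr]
      rfl
    · rw [List.getElem?_eq_none (by omega : res.length ≤ p),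
        List.getElem?_eq_none (by omega : kl.length ≤ p)]
      rfl
  calc (List.range chs.length).flatMap (fun r => res.flatMap (fun l => (l[r]?).toList))
      = (List.range chs.length).flatMap
          (fun r => (fun ch => (List.map F kl).flatMap (fun j => (ch[j]?).toList)) (chs.getD r [])) := by
        simp only [List.flatMap_def]
        congr 1
        exact List.map_congr_left step2
    _ = chs.flatMap (fun ch => (List.map F kl).flatMap (fun j => (ch[j]?).toList)) :=
        pv_range_flatMap chs (fun ch => (List.map F kl).flatMap (fun j => (ch[j]?).toList))

-- ===== VERDICT (by name: the statement is the Claim_ definition above) =====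
theorem de_nico_spec : Claim_equal_de_nico := by
  intro key msg _ hpre
  show de_nico key msg = de_nico_alt key msg
  by_cases hke : key = ""
  · subst hke
    rcases hpre with h | h
    · exact absurd rfl h
    · subst h; decide
  · exact pv_main key msg (fun h => hke (by simpa using h))
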